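-- pv_equiv track=rewrite | github.com/sankhadip10/scaler_problems | advance_2/Two_pointers/homework/array_three_pointers.py | solve
-- ===== SOURCE A (Python) =====
-- def solve(A,B,C):
--
--     ans = float('inf')
--     for i in range(len(A)):
--         for j in range(len(B)):
--             for k in range(len(C)):
--                 val1 = abs(A[i] - B[j])
--                 val2 = abs(B[j] - C[k])
--                 val3 = abs(C[k] - A[i])
--                 max_diff = max(val1,val2,val3)
--
--                 # Update the answer if this combination has a smaller maximum difference.
--                 ans = min(ans, max_diff)
--
--     return ans
-- ===== SOURCE B (Python) =====
-- def solve(A, B, C):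
--     # Sort each list, then sweep with three pointers, always advancing the
--     # pointer at the smallest current value.  For the current triple the max
--     # pairwise absolute difference equals max - min of the triple.
--     a, b, c = sorted(A), sorted(B), sorted(C)
--     i = j = k = 0
--     best = float('inf')
--     while i < len(a) and j < len(b) and k < len(c):
--         lo = min(a[i], b[j], c[k])
--         hi = max(a[i], b[j], c[k])
--         if hi - lo < best:
--             best = hi - lo
--         if a[i] == lo:
--             i += 1
--         elif b[j] == lo:
--             j += 1
--         else:
--             k += 1
--     return best
-- ===== Notes on version B (the rewrite author's own statement) =====
-- stated objective: faster
-- what changed: Replaces the O(n^3) triple loop over all index combinations by sorting each list and a three-pointer sweep that always advances the pointer at the smallest current value, using max(|a-b|,|b-c|,|c-a|) = max(a,b,c) - min(a,b,c).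
-- outside the precondition, e.g. on solve([], [1], [2]): A returns inf, B returns inf
import Mathlib
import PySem

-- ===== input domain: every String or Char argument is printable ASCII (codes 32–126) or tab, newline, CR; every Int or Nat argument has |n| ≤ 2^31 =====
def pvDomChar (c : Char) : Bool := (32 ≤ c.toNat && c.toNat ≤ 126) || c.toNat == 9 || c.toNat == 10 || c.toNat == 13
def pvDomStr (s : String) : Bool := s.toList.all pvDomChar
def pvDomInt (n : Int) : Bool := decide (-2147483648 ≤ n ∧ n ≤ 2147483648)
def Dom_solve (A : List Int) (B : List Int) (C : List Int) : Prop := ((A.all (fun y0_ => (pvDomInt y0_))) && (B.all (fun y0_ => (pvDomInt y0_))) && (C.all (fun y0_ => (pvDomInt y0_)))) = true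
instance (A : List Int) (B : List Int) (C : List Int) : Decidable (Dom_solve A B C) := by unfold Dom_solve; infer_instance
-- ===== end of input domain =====

-- B replaces A's O(|A|·|B|·|C|) triple loop by sorting each list and a three-pointer
-- sweep advancing the pointer at the smallest current value (faster; asymptotic).

-- ===== PORT A =====
-- ans = float('inf') is modelled by Option Int with none = inf (outside Pre_ the
-- Python value is the float inf, not an int; there the port returns the default 0).
def solve (A : List Int) (B : List Int) (C : List Int) : Int :=
  ((PySem.List.pyRange 0 (A.length : Int) 1).foldl (fun ans i =>
    (PySem.List.pyRange 0 (B.length : Int) 1).foldl (fun ans j =>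
      (PySem.List.pyRange 0 (C.length : Int) 1).foldl (fun ans k =>
        let val1 := |PySem.List.pyGetD A i 0 - PySem.List.pyGetD B j 0|
        let val2 := |PySem.List.pyGetD B j 0 - PySem.List.pyGetD C k 0|
        let val3 := |PySem.List.pyGetD C k 0 - PySem.List.pyGetD A i 0|
        let max_diff := max val1 (max val2 val3)
        some (match ans with
              | none => max_diff
              | some v => min v max_diff)) ans) ans) none).getD 0

-- ===== PORT B =====
-- the while loop over pointers i, j, k becomes structural recursion on the suffixes;
-- best : Option Int with none = float('inf')
def sweep : List Int → List Int → List Int → Option Int → Option Int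
  | a :: as, b :: bs, c :: cs, best =>
      let lo := min (min a b) c
      let hi := max (max a b) c
      let best' : Option Int := match best with
        | none => some (hi - lo)
        | some v => if hi - lo < v then some (hi - lo) else some v
      if a = lo then sweep as (b :: bs) (c :: cs) best'
      else if b = lo then sweep (a :: as) bs (c :: cs) best'
      else sweep (a :: as) (b :: bs) cs best'
  | _, _, _, best => best
termination_by as bs cs _ => as.length + bs.length + cs.length

def solve_alt (A : List Int) (B : List Int) (C : List Int) : Int :=
  (sweep (PySem.List.sorted A (fun x => x) false)
         (PySem.List.sorted B (fun x => x) false)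
         (PySem.List.sorted C (fun x => x) false) none).getD 0

-- ===== PRECONDITION & SPEC =====
-- Pre_ excludes inputs where some list is empty: there Python A (and B) return
-- float('inf'), which is not a value of the declared int type.
def Pre_solve (A : List Int) (B : List Int) (C : List Int) : Prop :=
  A ≠ [] ∧ B ≠ [] ∧ C ≠ []
instance (A : List Int) (B : List Int) (C : List Int) : Decidable (Pre_solve A B C) := by
  unfold Pre_solve; infer_instance
def pvWitness_solve : List Int × List Int × List Int := ([0], [1], [2])

def Spec_solve (A : List Int) (B : List Int) (C : List Int) (out : Int) : Prop := out = solve_alt A B C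
instance (A : List Int) (B : List Int) (C : List Int) (out : Int) : Decidable (Spec_solve A B C out) := by unfold Spec_solve; infer_instance

-- ===== CLAIM (what is proved, stated in full; the proofs are below) =====
def Claim_equal_solve : Prop := ∀ (A : List Int) (B : List Int) (C : List Int), Dom_solve A B C → Pre_solve A B C → Spec_solve A B C (solve A B C)

-- ===== LEMMAS AND PROOFS =====

-- the value minimised by both programs
def f3 (a b c : Int) : Int := max |a - b| (max |b - c| |c - a|)
-- the triple's span, what the sweep computes
def g3 (a b c : Int) : Int := max (max a b) c - min (min a b) c

theorem f3_eq_g3 (a b c : Int) : f3 a b c = g3 a b c := by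
  unfold f3 g3
  rcases abs_cases (a - b) with ⟨h1, _⟩ | ⟨h1, _⟩ <;>
  rcases abs_cases (b - c) with ⟨h2, _⟩ | ⟨h2, _⟩ <;>
  rcases abs_cases (c - a) with ⟨h3, _⟩ | ⟨h3, _⟩ <;> omega

def optMin (o : Option Int) (x : Int) : Option Int :=
  some (match o with | none => x | some v => min v x)

def vals3 (A B C : List Int) : List Int :=
  A.flatMap (fun a => B.flatMap (fun b => C.map (fun c => f3 a b c)))

theorem solve_eq_foldl (A B C : List Int) :
    solve A B C = (A.foldl (fun ans a => B.foldl (fun ans b =>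
      C.foldl (fun ans c => optMin ans (f3 a b c)) ans) ans) none).getD 0 := by
  have hInner : ∀ (a b : Int) (ans : Option Int),
      (PySem.List.pyRange 0 (C.length : Int) 1).foldl (fun ans k =>
          let val1 := |a - b|
          let val2 := |b - PySem.List.pyGetD C k 0|
          let val3 := |PySem.List.pyGetD C k 0 - a|
          let max_diff := max val1 (max val2 val3)
          some (match ans with
                | none => max_diff
                | some v => min v max_diff)) ans
        = C.foldl (fun ans c => optMin ans (f3 a b c)) ans :=
    fun a b ans => PySem.List.foldl_pyRange_zero_pyGetD' C 0 (fun ans c => optMin ans (f3 a b c)) ans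
  have hMid : ∀ (a : Int) (ans : Option Int),
      (PySem.List.pyRange 0 (B.length : Int) 1).foldl (fun ans j =>
        (PySem.List.pyRange 0 (C.length : Int) 1).foldl (fun ans k =>
          let val1 := |a - PySem.List.pyGetD B j 0|
          let val2 := |PySem.List.pyGetD B j 0 - PySem.List.pyGetD C k 0|
          let val3 := |PySem.List.pyGetD C k 0 - a|
          let max_diff := max val1 (max val2 val3)
          some (match ans with
                | none => max_diff
                | some v => min v max_diff)) ans) ans
        = B.foldl (fun ans b => C.foldl (fun ans c => optMin ans (f3 a b c)) ans) ans := by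
    intro a ans
    calc _ = (PySem.List.pyRange 0 (B.length : Int) 1).foldl (fun ans j =>
            C.foldl (fun ans c => optMin ans (f3 a (PySem.List.pyGetD B j 0) c)) ans) ans :=
          PySem.List.foldl_congr_mem _ _ _ _ (fun acc j _ => hInner a (PySem.List.pyGetD B j 0) acc)
      _ = _ := PySem.List.foldl_pyRange_zero_pyGetD' B 0
            (fun ans b => C.foldl (fun ans c => optMin ans (f3 a b c)) ans) ans
  unfold solve
  calc _ = ((PySem.List.pyRange 0 (A.length : Int) 1).foldl (fun ans i =>
          B.foldl (fun ans b => C.foldl (fun ans c =>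
            optMin ans (f3 (PySem.List.pyGetD A i 0) b c)) ans) ans) none).getD 0 :=
        congrArg (Option.getD · 0)
          (PySem.List.foldl_congr_mem _ _ _ _ (fun acc i _ => hMid (PySem.List.pyGetD A i 0) acc))
    _ = _ := congrArg (Option.getD · 0)
          (PySem.List.foldl_pyRange_zero_pyGetD' A 0
            (fun ans a => B.foldl (fun ans b => C.foldl (fun ans c => optMin ans (f3 a b c)) ans) ans) none)

theorem foldl_pair_eq (C : List Int) (a : Int) : ∀ (B : List Int) (o : Option Int),
    B.foldl (fun ans b => C.foldl (fun ans c => optMin ans (f3 a b c)) ans) o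
      = (B.flatMap (fun b => C.map (fun c => f3 a b c))).foldl optMin o := by
  intro B
  induction B with
  | nil => intro o; rfl
  | cons b B ih =>
    intro o
    rw [List.foldl_cons, List.flatMap_cons, List.foldl_append, List.foldl_map]
    exact ih _

theorem foldl_triple_eq (B C : List Int) : ∀ (A : List Int) (o : Option Int),
    A.foldl (fun ans a => B.foldl (fun ans b =>
        C.foldl (fun ans c => optMin ans (f3 a b c)) ans) ans) o
      = (vals3 A B C).foldl optMin o := by
  intro A
  induction A with
  | nil => intro o; rfl
  | cons a A ih =>
    intro o
    rw [List.foldl_cons, show vals3 (a :: A) B C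
        = (B.flatMap (fun b => C.map (fun c => f3 a b c))) ++ vals3 A B C from rfl,
      List.foldl_append, foldl_pair_eq]
    exact ih _

theorem foldl_optMin_some (l : List Int) (v : Int) :
    l.foldl optMin (some v) = some (l.foldl min v) := by
  induction l generalizing v with
  | nil => rfl
  | cons x xs ih => simp [optMin, List.foldl, ih]

theorem foldl_min_le_init (l : List Int) (v : Int) : l.foldl min v ≤ v := by
  induction l generalizing v with
  | nil => simp
  | cons x xs ih => exact le_trans (ih _) (min_le_left _ _)

theorem foldl_min_le_mem (l : List Int) (y : Int) (hy : y ∈ l) : ∀ v, l.foldl min v ≤ y := by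
  induction l with
  | nil => cases hy
  | cons x xs ih =>
    intro v
    rcases List.mem_cons.mp hy with rfl | h
    · exact le_trans (foldl_min_le_init xs _) (min_le_right _ _)
    · rw [List.foldl_cons]; exact ih h (min v x)

theorem foldl_min_cases (l : List Int) (v : Int) : l.foldl min v = v ∨ l.foldl min v ∈ l := by
  induction l generalizing v with
  | nil => simp
  | cons x xs ih =>
    rcases ih (min v x) with h | h
    · rcases le_total v x with hvx | hvx
      · left; simpa [min_eq_left hvx] using h
      · right; simp [List.foldl, min_eq_right hvx] at h ⊢; simp [h]
    · right; exact List.mem_cons_of_mem _ h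

theorem mem_vals3 {A B C : List Int} {x : Int} :
    x ∈ vals3 A B C ↔ ∃ a ∈ A, ∃ b ∈ B, ∃ c ∈ C, x = f3 a b c := by
  simp [vals3, List.mem_flatMap, List.mem_map, eq_comm]

def upd (best : Option Int) (d : Int) : Option Int :=
  match best with
  | none => some d
  | some v => if d < v then some d else some v

theorem sweep_cons (a b c : Int) (as bs cs : List Int) (best : Option Int) :
    sweep (a :: as) (b :: bs) (c :: cs) best =
      if a = min (min a b) c then
        sweep as (b :: bs) (c :: cs) (upd best (max (max a b) c - min (min a b) c))
      else if b = min (min a b) c then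
        sweep (a :: as) bs (c :: cs) (upd best (max (max a b) c - min (min a b) c))
      else
        sweep (a :: as) (b :: bs) cs (upd best (max (max a b) c - min (min a b) c)) := by
  rw [sweep.eq_def]; rfl

theorem sweep_base (as bs cs : List Int) (best : Option Int)
    (h : as = [] ∨ bs = [] ∨ cs = []) : sweep as bs cs best = best := by
  rcases as with _ | ⟨a, as⟩
  · rw [sweep.eq_def]
  rcases bs with _ | ⟨b, bs⟩
  · rw [sweep.eq_def]
  rcases cs with _ | ⟨c, cs⟩
  · rw [sweep.eq_def]
  simp at h

theorem upd_spec (best : Option Int) (d : Int) :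
    ∃ w, upd best d = some w ∧ w ≤ d ∧ (w = d ∨ best = some w) ∧
      (∀ v, best = some v → w ≤ v) := by
  cases best with
  | none =>
    exact ⟨d, rfl, le_refl d, Or.inl rfl, fun v h => by cases h⟩
  | some v =>
    rw [show upd (some v) d = if d < v then some d else some v from rfl]
    split_ifs with h
    · exact ⟨d, rfl, le_refl d, Or.inl rfl, fun u hu => by injection hu with h'; omega⟩
    · exact ⟨v, rfl, by omega, Or.inr rfl, fun u hu => by injection hu with h'; omega⟩

theorem upd_eq_some (best : Option Int) (d r : Int) (h : upd best d = some r) :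
    r = d ∨ best = some r := by
  cases best with
  | none => injection h with h'; exact Or.inl h'.symm
  | some v =>
    rw [show upd (some v) d = if d < v then some d else some v from rfl] at h
    split_ifs at h with h1
    · injection h with h'; exact Or.inl h'.symm
    · injection h with h'; exact Or.inr (by rw [h'])

-- sweep with a some-accumulator returns some value ≤ the accumulator
theorem sweep_mono : ∀ (as bs cs : List Int) (o : Option Int) (v : Int), o = some v →
    ∃ r, sweep as bs cs o = some r ∧ r ≤ v := by
  intro as bs cs o
  induction as, bs, cs, o using sweep.induct with
  | case1 a as b bs c cs best lo hi best' hcond ih =>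
    intro v hv
    have hcond' : a = min (min a b) c := hcond
    obtain ⟨w, hw, hwd, _, hwv⟩ := upd_spec best (max (max a b) c - min (min a b) c)
    obtain ⟨r, hr, hrw⟩ := ih w hw
    refine ⟨r, ?_, le_trans hrw (hwv v hv)⟩
    rw [sweep_cons, if_pos hcond']
    exact hr
  | case2 a as b bs c cs best lo hi best' hc1 hcond ih =>
    intro v hv
    have hc1' : ¬ a = min (min a b) c := hc1
    have hcond' : b = min (min a b) c := hcond
    obtain ⟨w, hw, hwd, _, hwv⟩ := upd_spec best (max (max a b) c - min (min a b) c)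
    obtain ⟨r, hr, hrw⟩ := ih w hw
    refine ⟨r, ?_, le_trans hrw (hwv v hv)⟩
    rw [sweep_cons, if_neg hc1', if_pos hcond']
    exact hr
  | case3 a as b bs c cs best lo hi best' hc1 hc2 ih =>
    intro v hv
    have hc1' : ¬ a = min (min a b) c := hc1
    have hc2' : ¬ b = min (min a b) c := hc2
    obtain ⟨w, hw, hwd, _, hwv⟩ := upd_spec best (max (max a b) c - min (min a b) c)
    obtain ⟨r, hr, hrw⟩ := ih w hw
    refine ⟨r, ?_, le_trans hrw (hwv v hv)⟩
    rw [sweep_cons, if_neg hc1', if_neg hc2']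
    exact hr
  | case4 as bs cs best h =>
    intro v hv
    have hnil : as = [] ∨ bs = [] ∨ cs = [] := by
      rcases as with _ | ⟨a, as⟩
      · exact Or.inl rfl
      rcases bs with _ | ⟨b, bs⟩
      · exact Or.inr (Or.inl rfl)
      rcases cs with _ | ⟨c, cs⟩
      · exact Or.inr (Or.inr rfl)
      exact (h a as b bs c cs rfl rfl rfl).elim
    exact ⟨v, by rw [sweep_base _ _ _ _ hnil]; exact hv, le_refl v⟩

-- every result of sweep is the accumulator or the span of some triple
theorem sweep_has : ∀ (as bs cs : List Int) (o : Option Int) (r : Int),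
    sweep as bs cs o = some r →
    o = some r ∨ ∃ a ∈ as, ∃ b ∈ bs, ∃ c ∈ cs, r = g3 a b c := by
  intro as bs cs o
  induction as, bs, cs, o using sweep.induct with
  | case1 a as b bs c cs best lo hi best' hcond ih =>
    intro r hr
    have hcond' : a = min (min a b) c := hcond
    rw [sweep_cons, if_pos hcond'] at hr
    rcases ih r hr with heq | ⟨a', ha', b', hb', c', hc', hre⟩
    · rcases upd_eq_some best _ r heq with rfl | hb
      · exact Or.inr ⟨a, List.mem_cons_self, b, List.mem_cons_self, c, List.mem_cons_self, rfl⟩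
      · exact Or.inl hb
    · exact Or.inr ⟨a', List.mem_cons_of_mem _ ha', b', hb', c', hc', hre⟩
  | case2 a as b bs c cs best lo hi best' hc1 hcond ih =>
    intro r hr
    have hc1' : ¬ a = min (min a b) c := hc1
    have hcond' : b = min (min a b) c := hcond
    rw [sweep_cons, if_neg hc1', if_pos hcond'] at hr
    rcases ih r hr with heq | ⟨a', ha', b', hb', c', hc', hre⟩
    · rcases upd_eq_some best _ r heq with rfl | hb
      · exact Or.inr ⟨a, List.mem_cons_self, b, List.mem_cons_self, c, List.mem_cons_self, rfl⟩
      · exact Or.inl hb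
    · exact Or.inr ⟨a', ha', b', List.mem_cons_of_mem _ hb', c', hc', hre⟩
  | case3 a as b bs c cs best lo hi best' hc1 hc2 ih =>
    intro r hr
    have hc1' : ¬ a = min (min a b) c := hc1
    have hc2' : ¬ b = min (min a b) c := hc2
    rw [sweep_cons, if_neg hc1', if_neg hc2'] at hr
    rcases ih r hr with heq | ⟨a', ha', b', hb', c', hc', hre⟩
    · rcases upd_eq_some best _ r heq with rfl | hb
      · exact Or.inr ⟨a, List.mem_cons_self, b, List.mem_cons_self, c, List.mem_cons_self, rfl⟩
      · exact Or.inl hb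
    · exact Or.inr ⟨a', ha', b', hb', c', List.mem_cons_of_mem _ hc', hre⟩
  | case4 as bs cs best h =>
    intro r hr
    have hnil : as = [] ∨ bs = [] ∨ cs = [] := by
      rcases as with _ | ⟨a, as⟩
      · exact Or.inl rfl
      rcases bs with _ | ⟨b, bs⟩
      · exact Or.inr (Or.inl rfl)
      rcases cs with _ | ⟨c, cs⟩
      · exact Or.inr (Or.inr rfl)
      exact (h a as b bs c cs rfl rfl rfl).elim
    rw [sweep_base _ _ _ _ hnil] at hr
    exact Or.inl hr

-- on sorted inputs the sweep result is a lower bound of every triple's span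
theorem sweep_ub : ∀ (as bs cs : List Int) (o : Option Int),
    as.Pairwise (· ≤ ·) → bs.Pairwise (· ≤ ·) → cs.Pairwise (· ≤ ·) →
    ∀ r : Int, sweep as bs cs o = some r →
    ∀ a ∈ as, ∀ b ∈ bs, ∀ c ∈ cs, r ≤ g3 a b c := by
  intro as bs cs o
  induction as, bs, cs, o using sweep.induct with
  | case1 a as b bs c cs best lo hi best' hcond ih =>
    intro ha hb hc r hr x hx y hy z hz
    have hcond' : a = min (min a b) c := hcond
    rw [sweep_cons, if_pos hcond'] at hr
    rcases List.mem_cons.mp hx with heq | hx'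
    · subst heq
      obtain ⟨w, hw, hwd, -, -⟩ := upd_spec best (max (max x b) c - min (min x b) c)
      have hr' : sweep as (b :: bs) (c :: cs) (some w) = some r := by rw [← hw]; exact hr
      obtain ⟨r', hr'', hrw⟩ := sweep_mono as (b :: bs) (c :: cs) (some w) w rfl
      have hrr : r = r' := by rw [hr'] at hr''; injection hr''
      have hby : b ≤ y := by
        rcases List.mem_cons.mp hy with rfl | h
        · exact le_refl y
        · exact (List.pairwise_cons.mp hb).1 y h
      have hcz : c ≤ z := by
        rcases List.mem_cons.mp hz with rfl | h
        · exact le_refl z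
        · exact (List.pairwise_cons.mp hc).1 z h
      unfold g3
      omega
    · exact ih (List.pairwise_cons.mp ha).2 hb hc r hr x hx' y hy z hz
  | case2 a as b bs c cs best lo hi best' hc1 hcond ih =>
    intro ha hb hc r hr x hx y hy z hz
    have hc1' : ¬ a = min (min a b) c := hc1
    have hcond' : b = min (min a b) c := hcond
    rw [sweep_cons, if_neg hc1', if_pos hcond'] at hr
    rcases List.mem_cons.mp hy with heq | hy'
    · subst heq
      obtain ⟨w, hw, hwd, -, -⟩ := upd_spec best (max (max a y) c - min (min a y) c)
      have hr' : sweep (a :: as) bs (c :: cs) (some w) = some r := by rw [← hw]; exact hr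
      obtain ⟨r', hr'', hrw⟩ := sweep_mono (a :: as) bs (c :: cs) (some w) w rfl
      have hrr : r = r' := by rw [hr'] at hr''; injection hr''
      have hax : a ≤ x := by
        rcases List.mem_cons.mp hx with rfl | h
        · exact le_refl x
        · exact (List.pairwise_cons.mp ha).1 x h
      have hcz : c ≤ z := by
        rcases List.mem_cons.mp hz with rfl | h
        · exact le_refl z
        · exact (List.pairwise_cons.mp hc).1 z h
      unfold g3
      omega
    · exact ih ha (List.pairwise_cons.mp hb).2 hc r hr x hx y hy' z hz
  | case3 a as b bs c cs best lo hi best' hc1 hc2 ih =>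
    intro ha hb hc r hr x hx y hy z hz
    have hc1' : ¬ a = min (min a b) c := hc1
    have hc2' : ¬ b = min (min a b) c := hc2
    rw [sweep_cons, if_neg hc1', if_neg hc2'] at hr
    rcases List.mem_cons.mp hz with heq | hz'
    · subst heq
      obtain ⟨w, hw, hwd, -, -⟩ := upd_spec best (max (max a b) z - min (min a b) z)
      have hr' : sweep (a :: as) (b :: bs) cs (some w) = some r := by rw [← hw]; exact hr
      obtain ⟨r', hr'', hrw⟩ := sweep_mono (a :: as) (b :: bs) cs (some w) w rfl
      have hrr : r = r' := by rw [hr'] at hr''; injection hr''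
      have hax : a ≤ x := by
        rcases List.mem_cons.mp hx with rfl | h
        · exact le_refl x
        · exact (List.pairwise_cons.mp ha).1 x h
      have hby : b ≤ y := by
        rcases List.mem_cons.mp hy with rfl | h
        · exact le_refl y
        · exact (List.pairwise_cons.mp hb).1 y h
      unfold g3
      omega
    · exact ih ha hb (List.pairwise_cons.mp hc).2 r hr x hx y hy z hz'
  | case4 as bs cs best h =>
    intro ha hb hc r hr x hx y hy z hz
    have hnil : as = [] ∨ bs = [] ∨ cs = [] := by
      rcases as with _ | ⟨a, as⟩
      · exact Or.inl rfl
      rcases bs with _ | ⟨b, bs⟩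
      · exact Or.inr (Or.inl rfl)
      rcases cs with _ | ⟨c, cs⟩
      · exact Or.inr (Or.inr rfl)
      exact (h a as b bs c cs rfl rfl rfl).elim
    rcases hnil with rfl | rfl | rfl
    · cases hx
    · cases hy
    · cases hz

theorem brute_spec (A B C : List Int) (hA : A ≠ []) (hB : B ≠ []) (hC : C ≠ []) :
    ∃ r, (vals3 A B C).foldl optMin none = some r ∧
      (∃ a ∈ A, ∃ b ∈ B, ∃ c ∈ C, r = f3 a b c) ∧
      (∀ a ∈ A, ∀ b ∈ B, ∀ c ∈ C, r ≤ f3 a b c) := by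
  obtain ⟨a0, A', rfl⟩ := List.exists_cons_of_ne_nil hA
  obtain ⟨b0, B', rfl⟩ := List.exists_cons_of_ne_nil hB
  obtain ⟨c0, C', rfl⟩ := List.exists_cons_of_ne_nil hC
  have hmem : f3 a0 b0 c0 ∈ vals3 (a0 :: A') (b0 :: B') (c0 :: C') :=
    mem_vals3.mpr ⟨a0, List.mem_cons_self, b0, List.mem_cons_self, c0, List.mem_cons_self, rfl⟩
  obtain ⟨x, xs, hxx⟩ := List.exists_cons_of_ne_nil (List.ne_nil_of_mem hmem)
  refine ⟨xs.foldl min x, ?_, ?_, ?_⟩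
  · rw [hxx, List.foldl_cons]
    exact foldl_optMin_some xs x
  · have : xs.foldl min x ∈ vals3 (a0 :: A') (b0 :: B') (c0 :: C') := by
      rw [hxx]
      rcases foldl_min_cases xs x with h | h
      · rw [h]; exact List.mem_cons_self
      · exact List.mem_cons_of_mem _ h
    exact mem_vals3.mp this
  · intro a ha b hb c hc
    have : f3 a b c ∈ x :: xs := by
      rw [← hxx]; exact mem_vals3.mpr ⟨a, ha, b, hb, c, hc, rfl⟩
    rcases List.mem_cons.mp this with h | h
    · rw [h]; exact foldl_min_le_init xs x
    · exact foldl_min_le_mem xs _ h x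

theorem sweep_none_some (as bs cs : List Int)
    (ha : as ≠ []) (hb : bs ≠ []) (hc : cs ≠ []) :
    ∃ r, sweep as bs cs none = some r := by
  obtain ⟨a, as', rfl⟩ := List.exists_cons_of_ne_nil ha
  obtain ⟨b, bs', rfl⟩ := List.exists_cons_of_ne_nil hb
  obtain ⟨c, cs', rfl⟩ := List.exists_cons_of_ne_nil hc
  rw [sweep_cons]
  split_ifs with h1 h2
  · obtain ⟨r, hr, -⟩ := sweep_mono as' (b :: bs') (c :: cs')
      (upd none (max (max a b) c - min (min a b) c)) _ rfl
    exact ⟨r, hr⟩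
  · obtain ⟨r, hr, -⟩ := sweep_mono (a :: as') bs' (c :: cs')
      (upd none (max (max a b) c - min (min a b) c)) _ rfl
    exact ⟨r, hr⟩
  · obtain ⟨r, hr, -⟩ := sweep_mono (a :: as') (b :: bs') cs'
      (upd none (max (max a b) c - min (min a b) c)) _ rfl
    exact ⟨r, hr⟩

theorem solve_eq_alt (A B C : List Int) (hA : A ≠ []) (hB : B ≠ []) (hC : C ≠ []) :
    solve A B C = solve_alt A B C := by
  obtain ⟨r1, h1, ⟨a1, ha1, b1, hb1, c1, hc1, he1⟩, hub1⟩ := brute_spec A B C hA hB hC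
  have hsaN : PySem.List.sorted A (fun x => x) false ≠ [] := by
    rw [Ne, PySem.List.sorted_eq_nil_iff]; exact hA
  have hsbN : PySem.List.sorted B (fun x => x) false ≠ [] := by
    rw [Ne, PySem.List.sorted_eq_nil_iff]; exact hB
  have hscN : PySem.List.sorted C (fun x => x) false ≠ [] := by
    rw [Ne, PySem.List.sorted_eq_nil_iff]; exact hC
  obtain ⟨r2, h2⟩ := sweep_none_some _ _ _ hsaN hsbN hscN
  have hhas := sweep_has _ _ _ none r2 h2
  rcases hhas with h | ⟨a2, ha2, b2, hb2, c2, hc2, he2⟩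
  · cases h
  have hub2 := sweep_ub _ _ _ none
    (PySem.List.sorted_pairwise A (fun x => x))
    (PySem.List.sorted_pairwise B (fun x => x))
    (PySem.List.sorted_pairwise C (fun x => x)) r2 h2
  have hle1 : r1 ≤ r2 := by
    rw [he2, ← f3_eq_g3]
    exact hub1 a2 ((PySem.List.mem_sorted _ _ _ _).mp ha2) b2 ((PySem.List.mem_sorted _ _ _ _).mp hb2)
      c2 ((PySem.List.mem_sorted _ _ _ _).mp hc2)
  have hle2 : r2 ≤ r1 := by
    rw [he1, f3_eq_g3]
    exact hub2 a1 ((PySem.List.mem_sorted _ _ _ _).mpr ha1) b1 ((PySem.List.mem_sorted _ _ _ _).mpr hb1)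
      c1 ((PySem.List.mem_sorted _ _ _ _).mpr hc1)
  have : r1 = r2 := le_antisymm hle1 hle2
  rw [solve_eq_foldl, foldl_triple_eq, h1]
  unfold solve_alt
  rw [h2, this]

-- ===== VERDICT (by name: the statement is the Claim_ definition above) =====
theorem solve_spec : Claim_equal_solve := by
  intro A B C _ hpre
  unfold Spec_solve
  exact solve_eq_alt A B C hpre.1 hpre.2.1 hpre.2.2
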